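-- pv_equiv track=rewrite | github.com/francojreyes/advent-of-code | 2022/day14/solution.py | part2
-- ===== SOURCE A (Python) =====
-- def part2(entities):
--     num_rocks = len(entities)
--     floor = max(x[1] for x in entities) + 2
--
--     q = [(500, 0)]
--     while q: # kinda BFS?
--         pos = q.pop()
--         if pos in entities or pos[1] == floor:
--             continue
--         entities.add(pos)
--
--         q.append((pos[0], pos[1] + 1))
--         q.append((pos[0] - 1, pos[1] + 1))
--         q.append((pos[0] + 1, pos[1] + 1))
--
--     return len(entities) - num_rocks
-- ===== SOURCE B (Python) =====
-- # Row-by-row reachability DP instead of DFS with an explicit stack.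
-- # Like A, mutates the `entities` set in place (adds every sand cell).
--
-- def _row(y, frontier, entities):
--     nxt = []
--     for c in frontier:
--         for x in (c - 1, c, c + 1):
--             if (x, y) not in entities:
--                 entities.add((x, y))
--                 nxt.append(x)
--     return nxt
--
-- def part2(entities):
--     floor = max(y for _, y in entities) + 2
--     count = 0
--     frontier = []
--     if floor > 0 and (500, 0) not in entities:
--         entities.add((500, 0))
--         frontier = [500]
--         count = 1
--     for y in range(1, floor):
--         frontier = _row(y, frontier, entities)
--         count += len(frontier)
--     return count
-- ===== Notes on version B (the rewrite author's own statement) =====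
-- stated objective: alternative
-- what changed: Replaces the explicit-stack DFS flood fill (push three children per cell, pop, re-test membership) by a row-by-row reachability DP that sweeps y from 0 to floor-1 keeping only the frontier of reachable x-columns of the current row; like A it inserts every sand cell into the entities set.
import Mathlib
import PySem

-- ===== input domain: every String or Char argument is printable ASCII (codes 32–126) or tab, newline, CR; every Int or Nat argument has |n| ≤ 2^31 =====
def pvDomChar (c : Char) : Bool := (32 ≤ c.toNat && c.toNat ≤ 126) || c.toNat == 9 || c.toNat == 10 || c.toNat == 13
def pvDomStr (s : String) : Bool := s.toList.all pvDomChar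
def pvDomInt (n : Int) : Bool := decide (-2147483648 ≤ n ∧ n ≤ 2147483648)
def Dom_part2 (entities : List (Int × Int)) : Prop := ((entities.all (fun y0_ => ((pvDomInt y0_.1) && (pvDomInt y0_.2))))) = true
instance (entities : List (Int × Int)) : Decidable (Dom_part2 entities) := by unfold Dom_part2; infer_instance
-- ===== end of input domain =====

-- B replaces A's explicit-stack DFS flood fill by a row-by-row frontier sweep (alternative
-- decomposition, same asymptotic cost); both mutate the Python `entities` set identically
-- (every sand cell is inserted), and the equivalence proved here is about the return value.
--
-- Python's `entities` is a hash set: membership tests are O(1) and only membership and size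
-- are ever consumed (its iteration order is not used by either program, except through
-- max(), which is order-independent). Both ports therefore model the set's CONTENTS as a
-- cons-list (for membership/size) together with a `Std.HashSet` mirror holding exactly the
-- same elements, used for the O(1) `... in entities` test, just like CPython's set.

-- ===== PORT A =====
-- Python's q.append/q.pop() work at the END of the list; we keep the stack top at the HEAD,
-- so the three appends become conses in reverse order (right, left, down).
-- `fuel` is only a totality guard: each iteration either pops one entry or marks a fresh
-- cell of the (2*floor+1) x floor candidate rectangle while growing the stack by two, so
-- 3*|rectangle| + 2 iterations always empty the stack (proved below).
def part2Loop (floor : Int) :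
    Nat → List (Int × Int) → Std.HashSet (Int × Int) → List (Int × Int) → List (Int × Int)
  | 0, E, _, _ => E
  | _ + 1, E, _, [] => E
  | fuel + 1, E, hs, pos :: q =>
    if hs.contains pos || decide (pos.2 = floor) then
      part2Loop floor fuel E hs q
    else
      part2Loop floor fuel (pos :: E) (hs.insert pos)
        ((pos.1 + 1, pos.2 + 1) :: (pos.1 - 1, pos.2 + 1) :: (pos.1, pos.2 + 1) :: q)

-- max(...) raises ValueError on the empty set — excluded by Pre_; the .getD default is never used there
def part2 (entities : List (Int × Int)) : Int :=
  let E0 : PySem.Set (Int × Int) := PySem.Set.ofList entities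
  let numRocks : Int := PySem.Set.len E0
  let floor : Int := ((PySem.List.max? (E0.map Prod.snd) (fun v => v)).getD (-2)) + 2
  let Efinal := part2Loop floor (3 * ((2 * floor.toNat + 1) * floor.toNat) + 2)
    E0 (Std.HashSet.ofList entities) [(500, 0)]
  (Efinal.length : Int) - numRocks

-- ===== PORT B =====
-- one row: for c in frontier: for x in (c-1, c, c+1): if (x, y) not in entities: append x, add it
def part2AltRow (y : Int) (frontier : List Int) (E : List (Int × Int))
    (hs : Std.HashSet (Int × Int)) :
    List Int × List (Int × Int) × Std.HashSet (Int × Int) :=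
  frontier.foldl
    (fun acc c =>
      [c - 1, c, c + 1].foldl
        (fun acc2 x =>
          if acc2.2.2.contains (x, y) then acc2
          else (acc2.1 ++ [x], (x, y) :: acc2.2.1, acc2.2.2.insert (x, y)))
        acc)
    ([], E, hs)

def part2_alt (entities : List (Int × Int)) : Int :=
  let E0 : PySem.Set (Int × Int) := PySem.Set.ofList entities
  let hs0 : Std.HashSet (Int × Int) := Std.HashSet.ofList entities
  let floor : Int := ((PySem.List.max? (E0.map Prod.snd) (fun v => v)).getD (-2)) + 2
  let init : List Int × List (Int × Int) × Std.HashSet (Int × Int) × Int :=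
    if floor > 0 && !(hs0.contains (500, 0)) then
      ([500], (500, 0) :: E0, hs0.insert (500, 0), 1)
    else ([], E0, hs0, 0)
  let fin := (PySem.List.pyRange 1 floor).foldl
    (fun st y =>
      let r := part2AltRow y st.1 st.2.1 st.2.2.1
      (r.1, r.2.1, r.2.2, st.2.2.2 + (r.1.length : Int)))
    init
  fin.2.2.2

-- ===== PRECONDITION & SPEC =====
-- Pre_ excludes exactly the inputs on which A does not return: the empty set (max() raises
-- ValueError) and sets whose maximal y-coordinate is below -2 (then floor < 0 and A's
-- while-loop never terminates, since every popped cell has y >= 0 and spawns three children).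
def Pre_part2 (entities : List (Int × Int)) : Prop :=
  entities ≠ [] ∧ ∃ p ∈ entities, -2 ≤ p.2
instance (entities : List (Int × Int)) : Decidable (Pre_part2 entities) := by
  unfold Pre_part2; infer_instance

def pvWitness_part2 : (List (Int × Int)) := [(498, 2), (502, 2)]

def Spec_part2 (entities : List (Int × Int)) (out : Int) : Prop := out = part2_alt entities
instance (entities : List (Int × Int)) (out : Int) : Decidable (Spec_part2 entities out) := by
  unfold Spec_part2; infer_instance

-- ===== CLAIM (what is proved, stated in full; the proofs are below) =====
def Claim_equal_part2 : Prop := ∀ (entities : List (Int × Int)), Dom_part2 entities → Pre_part2 entities → Spec_part2 entities (part2 entities)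

-- ===== LEMMAS AND PROOFS =====

lemma hashset_mem_insert (m : Std.HashSet (Int × Int)) (k z : Int × Int) :
    z ∈ m.insert k ↔ z = k ∨ z ∈ m := by
  rw [Std.HashSet.mem_insert, beq_iff_eq]
  constructor
  · rintro (rfl | h); exacts [Or.inl rfl, Or.inr h]
  · rintro (rfl | h); exacts [Or.inl rfl, Or.inr h]

/-- Reachability through sand cells: `RF floor E s x` means the DFS of A, run with rock set
`E`, can walk from cell `s` to cell `x` (every visited cell, endpoints included, is not in
`E` and not on the floor; each step moves one row down and at most one column sideways). -/
inductive RF (floor : Int) (E : List (Int × Int)) : (Int × Int) → (Int × Int) → Prop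
  | refl (p : Int × Int) : p ∉ E → p.2 ≠ floor → RF floor E p p
  | tail {s p : Int × Int} (c : Int × Int) : RF floor E s p → c.2 = p.2 + 1 →
      (c.1 = p.1 - 1 ∨ c.1 = p.1 ∨ c.1 = p.1 + 1) → c ∉ E → c.2 ≠ floor → RF floor E s c

lemma RF_src {floor : Int} {E : List (Int × Int)} {s x : Int × Int}
    (h : RF floor E s x) : s ∉ E ∧ s.2 ≠ floor := by
  induction h with
  | refl hp hf => exact ⟨hp, hf⟩
  | tail c h1 h2 h3 h4 h5 ih => exact ih

lemma RF_dst {floor : Int} {E : List (Int × Int)} {s x : Int × Int}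
    (h : RF floor E s x) : x ∉ E ∧ x.2 ≠ floor := by
  induction h with
  | refl hp hf => exact ⟨hp, hf⟩
  | tail c h1 h2 h3 h4 h5 ih => exact ⟨h4, h5⟩

lemma RF_mono {floor : Int} {E E' : List (Int × Int)} {s x : Int × Int}
    (hsub : ∀ z, z ∈ E → z ∈ E') (h : RF floor E' s x) : RF floor E s x := by
  induction h with
  | refl hp hf => exact RF.refl _ (fun hc => hp (hsub _ hc)) hf
  | tail c h1 h2 h3 h4 h5 ih => exact RF.tail c ih h2 h3 (fun hc => h4 (hsub _ hc)) h5

lemma RF_trans {floor : Int} {E : List (Int × Int)} {s m x : Int × Int}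
    (h1 : RF floor E s m) (h2 : RF floor E m x) : RF floor E s x := by
  induction h2 with
  | refl hp hf => exact h1
  | tail c hm hc2 hc1 hcE hcf ih => exact RF.tail c ih hc2 hc1 hcE hcf

/-- The three children A pushes for `p`, in stack order. -/
def children (p : Int × Int) : List (Int × Int) :=
  [(p.1 + 1, p.2 + 1), (p.1 - 1, p.2 + 1), (p.1, p.2 + 1)]

lemma RF_split {floor : Int} {E : List (Int × Int)} {p s x : Int × Int}
    (h : RF floor E s x) :
    x = p ∨ (∃ c ∈ children p, RF floor (p :: E) c x) ∨ RF floor (p :: E) s x := by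
  induction h with
  | refl hq hf =>
    by_cases hqp : s = p
    · exact Or.inl hqp
    · refine Or.inr (Or.inr (RF.refl _ ?_ hf))
      simp [hqp, hq]
  | tail c hder hc2 hc1 hcE hcf ih =>
    by_cases hcp : c = p
    · exact Or.inl hcp
    · have hcE' : c ∉ p :: E := by simp [hcp, hcE]
      rcases ih with hyp | ⟨c', hc'mem, hc'⟩ | hR
      · -- the parent is p itself: c is a direct child of p
        subst hyp
        refine Or.inr (Or.inl ⟨c, ?_, RF.refl _ hcE' hcf⟩)
        rcases c with ⟨a, b⟩
        simp only [children, List.mem_cons, List.not_mem_nil, or_false, Prod.mk.injEq]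
        simp only at hc1 hc2
        tauto
      · exact Or.inr (Or.inl ⟨c', hc'mem, RF.tail c hc' hc2 hc1 hcE' hcf⟩)
      · exact Or.inr (Or.inr (RF.tail c hR hc2 hc1 hcE' hcf))

/-- The candidate rectangle the DFS can ever mark cells in. -/
noncomputable def rect (floor : Int) : Finset (Int × Int) :=
  Finset.Icc (500 - floor) (500 + floor) ×ˢ Finset.Icc 0 (floor - 1)

noncomputable def freeCount (floor : Int) (E : List (Int × Int)) : Nat :=
  ((rect floor).filter (fun p => p ∉ E)).card

lemma mem_rect {floor : Int} {p : Int × Int} :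
    p ∈ rect floor ↔ (500 - floor ≤ p.1 ∧ p.1 ≤ 500 + floor) ∧ 0 ≤ p.2 ∧ p.2 ≤ floor - 1 := by
  simp [rect, Finset.mem_product, Finset.mem_Icc]

lemma freeCount_cons {floor : Int} {E : List (Int × Int)} {p : Int × Int}
    (hp : p ∈ rect floor) (hpE : p ∉ E) :
    freeCount floor (p :: E) + 1 = freeCount floor E := by
  unfold freeCount
  have hset : (rect floor).filter (fun z => z ∉ p :: E) =
      ((rect floor).filter (fun z => z ∉ E)).erase p := by
    ext z
    simp only [Finset.mem_filter, Finset.mem_erase, List.mem_cons]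
    tauto
  have hmem : p ∈ (rect floor).filter (fun z => z ∉ E) := by
    simp [Finset.mem_filter, hp, hpE]
  rw [hset, Finset.card_erase_of_mem hmem]
  have hpos : 0 < ((rect floor).filter (fun z => z ∉ E)).card := Finset.card_pos.mpr ⟨p, hmem⟩
  omega

lemma loop_mem (floor : Int) :
    ∀ (fuel : Nat) (E : List (Int × Int)) (hs : Std.HashSet (Int × Int))
      (q : List (Int × Int)),
    (∀ z, z ∈ hs ↔ z ∈ E) →
    (∀ p ∈ q, 0 ≤ p.2 ∧ p.2 ≤ floor ∧ p.1 - 500 ≤ p.2 ∧ 500 - p.1 ≤ p.2) →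
    3 * freeCount floor E + q.length ≤ fuel →
    ∀ x, x ∈ part2Loop floor fuel E hs q ↔ x ∈ E ∨ ∃ s ∈ q, RF floor E s x := by
  intro fuel
  induction fuel with
  | zero =>
    intro E hs q hsync hq hμ x
    have hq0 : q = [] := List.eq_nil_of_length_eq_zero (by omega)
    subst hq0
    simp [part2Loop]
  | succ n ih =>
    intro E hs q hsync hq hμ x
    match q with
    | [] => simp [part2Loop]
    | pos :: q =>
      rw [part2Loop]
      by_cases hskip : pos ∈ E ∨ pos.2 = floor
      · have hcond : (hs.contains pos || decide (pos.2 = floor)) = true := by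
          simp only [Bool.or_eq_true, Std.HashSet.contains_iff_mem, hsync pos,
            decide_eq_true_eq]
          exact hskip
        rw [if_pos hcond]
        rw [ih E hs q hsync (fun p hp => hq p (List.mem_cons_of_mem _ hp))
          (by simp at hμ ⊢; omega) x]
        constructor
        · rintro (hx | ⟨s, hs', hR⟩)
          · exact Or.inl hx
          · exact Or.inr ⟨s, List.mem_cons_of_mem _ hs', hR⟩
        · rintro (hx | ⟨s, hs', hR⟩)
          · exact Or.inl hx
          · rcases List.mem_cons.mp hs' with hsp | hsq
            · subst hsp
              rcases RF_src hR with ⟨h1, h2⟩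
              exact absurd hskip (by tauto)
            · exact Or.inr ⟨s, hsq, hR⟩
      · have hskip' : pos ∉ E ∧ pos.2 ≠ floor := by tauto
        obtain ⟨hposE, hposf⟩ := hskip'
        have hcond : ¬ ((hs.contains pos || decide (pos.2 = floor)) = true) := by
          simp only [Bool.or_eq_true, Std.HashSet.contains_iff_mem, hsync pos,
            decide_eq_true_eq]
          tauto
        rw [if_neg hcond]
        obtain ⟨hy0, hyf, hx1, hx2⟩ := hq pos List.mem_cons_self
        have hrect : pos ∈ rect floor := by rw [mem_rect]; omega
        have hfc := freeCount_cons hrect hposE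
        have hsync' : ∀ z, z ∈ hs.insert pos ↔ z ∈ pos :: E := by
          intro z
          rw [hashset_mem_insert, List.mem_cons, hsync z]
        have hq' : ∀ p ∈ (pos.1 + 1, pos.2 + 1) :: (pos.1 - 1, pos.2 + 1) ::
            (pos.1, pos.2 + 1) :: q,
            0 ≤ p.2 ∧ p.2 ≤ floor ∧ p.1 - 500 ≤ p.2 ∧ 500 - p.1 ≤ p.2 := by
          intro p hp
          rcases List.mem_cons.mp hp with rfl | hp
          · simp; omega
          rcases List.mem_cons.mp hp with rfl | hp
          · simp; omega
          rcases List.mem_cons.mp hp with rfl | hp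
          · simp; omega
          · exact hq p (List.mem_cons_of_mem _ hp)
        rw [ih (pos :: E) (hs.insert pos) _ hsync' hq' (by simp at hμ ⊢; omega) x]
        constructor
        · rintro (hx | ⟨s, hs', hR⟩)
          · rcases List.mem_cons.mp hx with rfl | hx
            · exact Or.inr ⟨x, List.mem_cons_self, RF.refl _ hposE hposf⟩
            · exact Or.inl hx
          · have hmono : RF floor (pos :: E) s x → RF floor E s x :=
              RF_mono (fun z hz => List.mem_cons_of_mem _ hz)
            have hstep : s ∈ children pos → Or (x ∈ E) (∃ t ∈ pos :: q, RF floor E t x) := by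
              intro hsc
              obtain ⟨hsE', hsf⟩ := RF_src hR
              have hsE : s ∉ E := fun hc => hsE' (List.mem_cons_of_mem _ hc)
              have hps : RF floor E pos s := by
                rcases s with ⟨a, b⟩
                simp only [children, List.mem_cons, List.not_mem_nil, or_false,
                  Prod.mk.injEq] at hsc
                refine RF.tail _ (RF.refl _ hposE hposf) ?_ ?_ hsE hsf <;>
                  simp only <;> omega
              exact Or.inr ⟨pos, List.mem_cons_self, RF_trans hps (hmono hR)⟩
            rcases List.mem_cons.mp hs' with rfl | hs'
            · exact hstep (by simp [children])
            rcases List.mem_cons.mp hs' with rfl | hs'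
            · exact hstep (by simp [children])
            rcases List.mem_cons.mp hs' with rfl | hs'
            · exact hstep (by simp [children])
            · exact Or.inr ⟨s, List.mem_cons_of_mem _ hs', hmono hR⟩
        · rintro (hx | ⟨s, hs', hR⟩)
          · exact Or.inl (List.mem_cons_of_mem _ hx)
          · rcases RF_split (p := pos) hR with rfl | ⟨c, hcmem, hc⟩ | hR'
            · exact Or.inl List.mem_cons_self
            · refine Or.inr ⟨c, ?_, hc⟩
              simp only [children, List.mem_cons, List.not_mem_nil, or_false] at hcmem
              simp only [List.mem_cons]
              tauto
            · rcases List.mem_cons.mp hs' with rfl | hsq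
              · exact absurd (RF_src hR').1 (by simp)
              · exact Or.inr ⟨s, by simp [hsq], hR'⟩

lemma loop_nodup (floor : Int) :
    ∀ (fuel : Nat) (E : List (Int × Int)) (hs : Std.HashSet (Int × Int))
      (q : List (Int × Int)),
    (∀ z, z ∈ hs ↔ z ∈ E) → E.Nodup → (part2Loop floor fuel E hs q).Nodup := by
  intro fuel
  induction fuel with
  | zero => intro E hs q hsync h; simpa [part2Loop] using h
  | succ n ih =>
    intro E hs q hsync h
    match q with
    | [] => simpa [part2Loop] using h
    | pos :: q =>
      rw [part2Loop]
      by_cases hcond : (hs.contains pos || decide (pos.2 = floor)) = true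
      · rw [if_pos hcond]
        exact ih E hs q hsync h
      · rw [if_neg hcond]
        have hposE : pos ∉ E := by
          intro hc
          exact hcond (by
            simp only [Bool.or_eq_true, Std.HashSet.contains_iff_mem, hsync pos]
            exact Or.inl hc)
        refine ih (pos :: E) (hs.insert pos) _ ?_ (List.nodup_cons.mpr ⟨hposE, h⟩)
        intro z
        rw [hashset_mem_insert, List.mem_cons, hsync z]

-- ---- B side: the row sweep ----

/-- Pure evolution of the in-row frontier accumulator for one candidate column. -/
def curStep (y : Int) (Estart : List (Int × Int)) (cur : List Int) (x : Int) : List Int :=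
  if (x, y) ∈ Estart ∨ x ∈ cur then cur else cur ++ [x]

/-- Pure evolution of the in-row frontier over the whole previous frontier. -/
def rowFold (y : Int) (Estart : List (Int × Int)) (fr cur : List Int) : List Int :=
  fr.foldl (fun cur c => [c - 1, c, c + 1].foldl (curStep y Estart) cur) cur

lemma inner_step (y : Int) (Estart : List (Int × Int)) (cur : List Int)
    (hs : Std.HashSet (Int × Int)) (x : Int)
    (hsync : ∀ z, z ∈ hs ↔ z ∈ (cur.map (fun v => (v, y))).reverse ++ Estart) :
    (if hs.contains (x, y) then (cur, (cur.map (fun v => (v, y))).reverse ++ Estart, hs)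
      else (cur ++ [x], (x, y) :: ((cur.map (fun v => (v, y))).reverse ++ Estart),
        hs.insert (x, y)))
    = (curStep y Estart cur x,
       ((curStep y Estart cur x).map (fun v => (v, y))).reverse ++ Estart,
       (if hs.contains (x, y) then hs else hs.insert (x, y)))
    ∧ (∀ z, z ∈ (if hs.contains (x, y) then hs else hs.insert (x, y)) ↔
        z ∈ ((curStep y Estart cur x).map (fun v => (v, y))).reverse ++ Estart) := by
  have hmem : hs.contains (x, y) = true ↔ (x, y) ∈ Estart ∨ x ∈ cur := by
    rw [Std.HashSet.contains_iff_mem, hsync]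
    constructor
    · intro hz
      rcases List.mem_append.mp hz with hz | hz
      · rw [List.mem_reverse] at hz
        obtain ⟨a, ha, hae⟩ := List.mem_map.mp hz
        have hax : a = x := by simpa using congrArg Prod.fst hae
        exact Or.inr (hax ▸ ha)
      · exact Or.inl hz
    · rintro (hz | hz)
      · exact List.mem_append.mpr (Or.inr hz)
      · refine List.mem_append.mpr (Or.inl ?_)
        rw [List.mem_reverse]
        exact List.mem_map.mpr ⟨x, hz, rfl⟩
  by_cases h : (x, y) ∈ Estart ∨ x ∈ cur
  · rw [if_pos (hmem.mpr h), if_pos (hmem.mpr h)]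
    refine ⟨by simp [curStep, h], ?_⟩
    intro z
    rw [hsync z]
    simp [curStep, h]
  · have hcf : ¬ (hs.contains (x, y) = true) := fun hc => h (hmem.mp hc)
    rw [if_neg hcf, if_neg hcf]
    have hcs : curStep y Estart cur x = cur ++ [x] := by simp [curStep, h]
    constructor
    · rw [hcs]
      simp [List.map_append, List.reverse_append]
    · intro z
      rw [hashset_mem_insert, hsync z, hcs]
      simp only [List.map_append, List.reverse_append, List.map_cons, List.map_nil,
        List.reverse_cons, List.reverse_nil, List.nil_append, List.cons_append,
        List.mem_cons, List.mem_append]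

lemma row_eq (y : Int) (Estart : List (Int × Int)) :
    ∀ (fr cur : List Int) (hs : Std.HashSet (Int × Int)),
    (∀ z, z ∈ hs ↔ z ∈ (cur.map (fun v => (v, y))).reverse ++ Estart) →
    ∃ hs' : Std.HashSet (Int × Int),
      fr.foldl
        (fun acc c =>
          [c - 1, c, c + 1].foldl
            (fun acc2 x =>
              if acc2.2.2.contains (x, y) then acc2
              else (acc2.1 ++ [x], (x, y) :: acc2.2.1, acc2.2.2.insert (x, y)))
            acc)
        (cur, (cur.map (fun v => (v, y))).reverse ++ Estart, hs)
      = (rowFold y Estart fr cur,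
         ((rowFold y Estart fr cur).map (fun v => (v, y))).reverse ++ Estart, hs')
      ∧ (∀ z, z ∈ hs' ↔
          z ∈ ((rowFold y Estart fr cur).map (fun v => (v, y))).reverse ++ Estart) := by
  intro fr
  induction fr with
  | nil =>
    intro cur hs hsync
    exact ⟨hs, by simp [rowFold], by simpa [rowFold] using hsync⟩
  | cons c fr ih =>
    intro cur hs hsync
    obtain ⟨heq1, hsync1⟩ := inner_step y Estart cur hs (c - 1) hsync
    obtain ⟨heq2, hsync2⟩ := inner_step y Estart _ _ c hsync1
    obtain ⟨heq3, hsync3⟩ := inner_step y Estart _ _ (c + 1) hsync2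
    obtain ⟨hs', hfin, hsyncf⟩ := ih ([c - 1, c, c + 1].foldl (curStep y Estart) cur) _ hsync3
    refine ⟨hs', ?_, ?_⟩
    · rw [List.foldl_cons]
      simp only [List.foldl_cons, List.foldl_nil] at heq1 heq2 heq3 hfin ⊢
      rw [heq1, heq2, heq3, hfin]
      have : rowFold y Estart (c :: fr) cur
          = rowFold y Estart fr (curStep y Estart (curStep y Estart
              (curStep y Estart cur (c - 1)) c) (c + 1)) := by
        simp [rowFold]
      rw [this]
    · have : rowFold y Estart (c :: fr) cur
          = rowFold y Estart fr (curStep y Estart (curStep y Estart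
              (curStep y Estart cur (c - 1)) c) (c + 1)) := by
        simp [rowFold]
      rw [this]
      simpa using hsyncf

lemma part2AltRow_eq (y : Int) (fr : List Int) (E : List (Int × Int))
    (hs : Std.HashSet (Int × Int)) (hsync : ∀ z, z ∈ hs ↔ z ∈ E) :
    ∃ hs' : Std.HashSet (Int × Int),
      part2AltRow y fr E hs
      = (rowFold y E fr [], ((rowFold y E fr []).map (fun v => (v, y))).reverse ++ E, hs')
      ∧ (∀ z, z ∈ hs' ↔ z ∈ ((rowFold y E fr []).map (fun v => (v, y))).reverse ++ E) := by
  obtain ⟨hs', heq, hsync'⟩ := row_eq y E fr [] hs (by simpa using hsync)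
  exact ⟨hs', by simpa [part2AltRow] using heq, hsync'⟩

lemma mem_curStep {y : Int} {Estart : List (Int × Int)} {cur : List Int} {x z : Int} :
    z ∈ curStep y Estart cur x ↔ z ∈ cur ∨ (z = x ∧ (x, y) ∉ Estart) := by
  unfold curStep
  split_ifs with h
  · constructor
    · exact Or.inl
    · rintro (hz | ⟨rfl, hzE⟩)
      · exact hz
      · tauto
  · simp only [List.mem_append, List.mem_singleton]
    tauto

lemma nodup_curStep {y : Int} {Estart : List (Int × Int)} {cur : List Int} {x : Int}
    (h : cur.Nodup) : (curStep y Estart cur x).Nodup := by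
  unfold curStep
  split_ifs with hc
  · exact h
  · have hx : x ∉ cur := fun hx => hc (Or.inr hx)
    rw [List.nodup_append]
    refine ⟨h, List.nodup_singleton x, ?_⟩
    intro a ha b hb
    rw [List.mem_singleton] at hb
    subst hb
    exact fun hab => hx (hab ▸ ha)

lemma mem_rowFold {y : Int} {Estart : List (Int × Int)} :
    ∀ {fr cur : List Int} {z : Int},
    z ∈ rowFold y Estart fr cur ↔
      z ∈ cur ∨ ((z, y) ∉ Estart ∧ ∃ c ∈ fr, z = c - 1 ∨ z = c ∨ z = c + 1) := by
  intro fr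
  induction fr with
  | nil => intro cur z; simp [rowFold]
  | cons c fr ih =>
    intro cur z
    have hstep : rowFold y Estart (c :: fr) cur
        = rowFold y Estart fr ([c - 1, c, c + 1].foldl (curStep y Estart) cur) := by
      simp [rowFold]
    have hm : z ∈ [c - 1, c, c + 1].foldl (curStep y Estart) cur ↔
        z ∈ cur ∨ ((z, y) ∉ Estart ∧ (z = c - 1 ∨ z = c ∨ z = c + 1)) := by
      simp only [List.foldl_cons, List.foldl_nil, mem_curStep]
      constructor
      · rintro (((h | ⟨rfl, h⟩) | ⟨rfl, h⟩) | ⟨rfl, h⟩)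
        · exact Or.inl h
        · exact Or.inr ⟨h, Or.inl rfl⟩
        · exact Or.inr ⟨h, Or.inr (Or.inl rfl)⟩
        · exact Or.inr ⟨h, Or.inr (Or.inr rfl)⟩
      · rintro (h | ⟨hE, (rfl | rfl | rfl)⟩)
        · exact Or.inl (Or.inl (Or.inl h))
        · exact Or.inl (Or.inl (Or.inr ⟨rfl, hE⟩))
        · exact Or.inl (Or.inr ⟨rfl, hE⟩)
        · exact Or.inr ⟨rfl, hE⟩
    rw [hstep, ih, hm]
    constructor
    · rintro ((hz | ⟨hE, hd⟩) | ⟨hE, c', hc', hd⟩)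
      · exact Or.inl hz
      · exact Or.inr ⟨hE, c, List.mem_cons_self, hd⟩
      · exact Or.inr ⟨hE, c', List.mem_cons_of_mem _ hc', hd⟩
    · rintro (hz | ⟨hE, c', hc', hd⟩)
      · exact Or.inl (Or.inl hz)
      · rcases List.mem_cons.mp hc' with rfl | hmem
        · exact Or.inl (Or.inr ⟨hE, hd⟩)
        · exact Or.inr ⟨hE, c', hmem, hd⟩

lemma nodup_rowFold {y : Int} {Estart : List (Int × Int)} :
    ∀ {fr cur : List Int}, cur.Nodup → (rowFold y Estart fr cur).Nodup := by
  intro fr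
  induction fr with
  | nil => intro cur h; simpa [rowFold] using h
  | cons c fr ih =>
    intro cur h
    have hstep : rowFold y Estart (c :: fr) cur
        = rowFold y Estart fr ([c - 1, c, c + 1].foldl (curStep y Estart) cur) := by
      simp [rowFold]
    rw [hstep]
    refine ih ?_
    simp only [List.foldl_cons, List.foldl_nil]
    exact nodup_curStep (nodup_curStep (nodup_curStep h))

-- ---- facts about reachability from the source ----

lemma RF_le {floor : Int} {E : List (Int × Int)} {s x : Int × Int}
    (h : RF floor E s x) : s.2 ≤ x.2 := by
  induction h with
  | refl hp hf => omega
  | tail c h1 h2 h3 h4 h5 ih => omega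

lemma RF_bounds {floor : Int} {E : List (Int × Int)} {z : Int × Int} (hf : 0 ≤ floor)
    (h : RF floor E (500, 0) z) : 0 ≤ z.2 ∧ z.2 < floor := by
  induction h with
  | refl hp hfl => simp only at hfl ⊢; omega
  | tail c h1 h2 h3 h4 h5 ih => omega

lemma RF_cases {floor : Int} {E : List (Int × Int)} {s z : Int × Int}
    (h : RF floor E s z) :
    z = s ∨ ∃ p, RF floor E s p ∧ z.2 = p.2 + 1 ∧
      (z.1 = p.1 - 1 ∨ z.1 = p.1 ∨ z.1 = p.1 + 1) ∧ z ∉ E ∧ z.2 ≠ floor := by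
  cases h with
  | refl hp hf => exact Or.inl rfl
  | tail c h1 h2 h3 h4 h5 => exact Or.inr ⟨_, h1, h2, h3, h4, h5⟩

lemma Sand_zero {floor : Int} {E : List (Int × Int)} {x : Int} :
    RF floor E (500, 0) (x, 0) ↔ x = 500 ∧ ((500, 0) : Int × Int) ∉ E ∧ (0 : Int) ≠ floor := by
  constructor
  · intro h
    rcases RF_cases h with heq | ⟨p, hp, h2, h3, h4, h5⟩
    · have hx : x = 500 := by simpa using congrArg Prod.fst heq
      rcases RF_dst h with ⟨hE, hf⟩
      subst hx
      exact ⟨rfl, hE, hf⟩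
    · have := RF_le hp
      simp only at h2 this
      omega
  · rintro ⟨rfl, hE, hf⟩
    exact RF.refl _ hE hf

lemma Sand_succ {floor : Int} {E : List (Int × Int)} {x y : Int} (hy : 0 ≤ y) :
    RF floor E (500, 0) (x, y + 1) ↔
      (y + 1 ≠ floor ∧ ((x, y + 1) : Int × Int) ∉ E ∧
        ∃ c, RF floor E (500, 0) (c, y) ∧ (x = c - 1 ∨ x = c ∨ x = c + 1)) := by
  constructor
  · intro h
    rcases RF_cases h with heq | ⟨p, hp, h2, h3, h4, h5⟩
    · exfalso
      have := congrArg Prod.snd heq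
      simp only at this
      omega
    · have hp2 : p.2 = y := by simp only at h2; omega
      refine ⟨h5, h4, p.1, ?_, by simpa using h3⟩
      have : p = (p.1, y) := by rw [← hp2]
      rwa [this] at hp
  · rintro ⟨hf, hE, c, hc, hd⟩
    exact RF.tail _ hc (by simp) (by simpa using hd) hE hf

-- ---- the outer sweep of B ----

/-- One step of B's outer loop (identical to the lambda in `part2_alt`). -/
def bStep (st : List Int × List (Int × Int) × Std.HashSet (Int × Int) × Int) (y : Int) :
    List Int × List (Int × Int) × Std.HashSet (Int × Int) × Int :=
  let r := part2AltRow y st.1 st.2.1 st.2.2.1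
  (r.1, r.2.1, r.2.2, st.2.2.2 + (r.1.length : Int))

lemma outer_inv (floor : Int) (E0 : List (Int × Int)) (hs0 : Std.HashSet (Int × Int))
    (hE0 : E0.Nodup) (hsync0 : ∀ z, z ∈ hs0 ↔ z ∈ E0) (hfl : 1 ≤ floor) :
    ∀ (k : Nat), 1 ≤ k → (k : Int) ≤ floor →
    ((∀ x : Int,
        x ∈ ((PySem.List.pyRange 1 (k : Int)).foldl bStep
          (if (decide (floor > 0) && !(hs0.contains (500, 0))) = true then
            ([500], (500, 0) :: E0, hs0.insert (500, 0), 1) else ([], E0, hs0, 0))).1 ↔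
        RF floor E0 (500, 0) (x, (k : Int) - 1)) ∧
     (∀ z : Int × Int,
        z ∈ ((PySem.List.pyRange 1 (k : Int)).foldl bStep
          (if (decide (floor > 0) && !(hs0.contains (500, 0))) = true then
            ([500], (500, 0) :: E0, hs0.insert (500, 0), 1) else ([], E0, hs0, 0))).2.1 ↔
        z ∈ E0 ∨ (RF floor E0 (500, 0) z ∧ z.2 ≤ (k : Int) - 1)) ∧
     ((PySem.List.pyRange 1 (k : Int)).foldl bStep
          (if (decide (floor > 0) && !(hs0.contains (500, 0))) = true then
            ([500], (500, 0) :: E0, hs0.insert (500, 0), 1) else ([], E0, hs0, 0))).2.1.Nodup ∧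
     (∀ z : Int × Int,
        z ∈ ((PySem.List.pyRange 1 (k : Int)).foldl bStep
          (if (decide (floor > 0) && !(hs0.contains (500, 0))) = true then
            ([500], (500, 0) :: E0, hs0.insert (500, 0), 1) else ([], E0, hs0, 0))).2.2.1 ↔
        z ∈ ((PySem.List.pyRange 1 (k : Int)).foldl bStep
          (if (decide (floor > 0) && !(hs0.contains (500, 0))) = true then
            ([500], (500, 0) :: E0, hs0.insert (500, 0), 1) else ([], E0, hs0, 0))).2.1) ∧
     ((PySem.List.pyRange 1 (k : Int)).foldl bStep
          (if (decide (floor > 0) && !(hs0.contains (500, 0))) = true then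
            ([500], (500, 0) :: E0, hs0.insert (500, 0), 1) else ([], E0, hs0, 0))).2.2.2
       = (((PySem.List.pyRange 1 (k : Int)).foldl bStep
          (if (decide (floor > 0) && !(hs0.contains (500, 0))) = true then
            ([500], (500, 0) :: E0, hs0.insert (500, 0), 1) else ([], E0, hs0, 0))).2.1.length : Int)
         - (E0.length : Int)) := by
  intro k
  induction k with
  | zero => intro h; omega
  | succ k ih =>
    intro _ hkf
    by_cases hk1 : k = 0
    · -- base row: k+1 = 1, no outer iteration has run yet
      subst hk1
      have h11 : PySem.List.pyRange 1 ((0 + 1 : Nat) : Int) = [] := by decide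
      rw [h11]
      simp only [List.foldl_nil]
      have hfl0 : (0 : Int) ≠ floor := by omega
      by_cases hmem : ((500, 0) : Int × Int) ∈ E0
      · have hcond : (decide (floor > 0) && !(hs0.contains (500, 0))) = false := by
          simp [hsync0, hmem]
        rw [hcond]
        simp only [Bool.false_eq_true, if_false]
        have hnosand : ∀ z : Int × Int, ¬ RF floor E0 (500, 0) z := by
          intro z hz
          exact (RF_src hz).1 hmem
        refine ⟨?_, ?_, hE0, fun z => hsync0 z, by omega⟩
        · intro x
          simp only [List.not_mem_nil, false_iff]
          exact hnosand _
        · intro z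
          constructor
          · exact Or.inl
          · rintro (hz | ⟨hz, -⟩)
            · exact hz
            · exact absurd hz (hnosand _)
      · have hcond : (decide (floor > 0) && !(hs0.contains (500, 0))) = true := by
          simp [hsync0, hmem]
          omega
        rw [hcond]
        simp only [if_true]
        have hk0 : ((0 + 1 : Nat) : Int) - 1 = 0 := by omega
        rw [hk0]
        refine ⟨?_, ?_, ?_, ?_, ?_⟩
        · intro x
          rw [Sand_zero]
          simp only [List.mem_singleton]
          constructor
          · rintro rfl; exact ⟨rfl, hmem, hfl0⟩
          · rintro ⟨rfl, -, -⟩; rfl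
        · intro z
          simp only [List.mem_cons]
          constructor
          · rintro (rfl | hz)
            · exact Or.inr ⟨Sand_zero.mpr ⟨rfl, hmem, hfl0⟩, by omega⟩
            · exact Or.inl hz
          · rintro (hz | ⟨hz, hz2⟩)
            · exact Or.inr hz
            · have hb := RF_bounds (by omega) hz
              have hz0 : z.2 = 0 := by omega
              left
              have hzz : z = (z.1, z.2) := rfl
              rw [hzz, hz0] at hz
              obtain ⟨h5, -, -⟩ := Sand_zero.mp hz
              rw [hzz, hz0, h5]
        · exact List.nodup_cons.mpr ⟨hmem, hE0⟩
        · intro z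
          rw [hashset_mem_insert, List.mem_cons, hsync0 z]
        · simp only [List.length_cons]
          push_cast
          ring
    · -- inductive row step
      have hk : 1 ≤ k := by omega
      have hkf' : (k : Int) ≤ floor := by push_cast at hkf; omega
      have hklt : (k : Int) < floor := by push_cast at hkf; omega
      obtain ⟨ha, hb, hc, hd, he⟩ := ih hk hkf'
      have hrange : PySem.List.pyRange 1 ((k + 1 : Nat) : Int)
          = PySem.List.pyRange 1 (k : Int) ++ [(k : Int)] := by
        have : ((k + 1 : Nat) : Int) = (k : Int) + 1 := by push_cast; ring
        rw [this]
        exact PySem.List.pyRange_one_succ_right (by omega)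
      rw [hrange, List.foldl_append]
      set st := (PySem.List.pyRange 1 (k : Int)).foldl bStep
        (if (decide (floor > 0) && !(hs0.contains (500, 0))) = true then
          ([500], (500, 0) :: E0, hs0.insert (500, 0), 1) else ([], E0, hs0, 0)) with hst
      simp only [List.foldl_cons, List.foldl_nil]
      obtain ⟨hs', hrow, hsync'⟩ := part2AltRow_eq (k : Int) st.1 st.2.1 st.2.2.1 hd
      have hRmem : ∀ x : Int, x ∈ rowFold (k : Int) st.2.1 st.1 [] ↔
          RF floor E0 (500, 0) (x, (k : Int)) := by
        intro x
        rw [mem_rowFold]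
        have hEk : (((x, (k : Int)) : Int × Int) ∈ st.2.1) ↔
            ((x, (k : Int)) : Int × Int) ∈ E0 := by
          rw [hb]
          constructor
          · rintro (hz | ⟨-, hz2⟩)
            · exact hz
            · exfalso; simp only at hz2; omega
          · exact Or.inl
        have hs1 : RF floor E0 (500, 0) (x, ((k : Int) - 1) + 1) ↔
            ((k : Int) - 1) + 1 ≠ floor ∧ ((x, ((k : Int) - 1) + 1) : Int × Int) ∉ E0 ∧
            ∃ c, RF floor E0 (500, 0) (c, (k : Int) - 1) ∧ (x = c - 1 ∨ x = c ∨ x = c + 1) :=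
          Sand_succ (by omega)
        have hkk : ((k : Int) - 1) + 1 = (k : Int) := by ring
        rw [hkk] at hs1
        rw [hs1]
        simp only [List.not_mem_nil, false_or]
        constructor
        · rintro ⟨hnE, c, hcmem, hd'⟩
          exact ⟨by omega, fun hc' => hnE (hEk.mpr hc'), c, (ha c).mp hcmem, hd'⟩
        · rintro ⟨-, hnE, c, hcR, hd'⟩
          exact ⟨fun hc' => hnE (hEk.mp hc'), c, (ha c).mpr hcR, hd'⟩
      have hRnd : (rowFold (k : Int) st.2.1 st.1 []).Nodup := nodup_rowFold List.nodup_nil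
      have hRnotE : ∀ x ∈ rowFold (k : Int) st.2.1 st.1 [],
          ((x, (k : Int)) : Int × Int) ∉ st.2.1 := by
        intro x hx
        rw [mem_rowFold] at hx
        rcases hx with hx | ⟨hnE, -⟩
        · exact absurd hx (List.not_mem_nil)
        · exact hnE
      have hmapmem : ∀ z : Int × Int,
          z ∈ ((rowFold (k : Int) st.2.1 st.1 []).map (fun v => (v, (k : Int)))).reverse
          ↔ z.2 = (k : Int) ∧ z.1 ∈ rowFold (k : Int) st.2.1 st.1 [] := by
        intro z
        rw [List.mem_reverse, List.mem_map]
        constructor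
        · rintro ⟨a, ha, rfl⟩
          exact ⟨rfl, ha⟩
        · rintro ⟨hz2, hz1⟩
          exact ⟨z.1, hz1, by rw [← hz2]⟩
      refine ⟨?_, ?_, ?_, ?_, ?_⟩
      · intro x
        have hcast : ((k + 1 : Nat) : Int) - 1 = (k : Int) := by push_cast; ring
        rw [hcast]
        simp only [bStep, hrow]
        exact hRmem x
      · intro z
        have hcast : ((k + 1 : Nat) : Int) - 1 = (k : Int) := by push_cast; ring
        rw [hcast]
        simp only [bStep, hrow, List.mem_append]
        rw [hmapmem]
        constructor
        · rintro (⟨hz2, hz1⟩ | hz)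
          · refine Or.inr ⟨?_, by omega⟩
            have hzz : z = (z.1, z.2) := rfl
            rw [hzz, hz2]
            exact (hRmem z.1).mp hz1
          · rcases (hb z).mp hz with hz | ⟨hz, hz2⟩
            · exact Or.inl hz
            · exact Or.inr ⟨hz, by omega⟩
        · rintro (hz | ⟨hz, hz2⟩)
          · exact Or.inr ((hb z).mpr (Or.inl hz))
          · by_cases hle : z.2 ≤ (k : Int) - 1
            · exact Or.inr ((hb z).mpr (Or.inr ⟨hz, hle⟩))
            · have hz2' : z.2 = (k : Int) := by omega
              left
              refine ⟨hz2', ?_⟩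
              apply (hRmem z.1).mpr
              have hzz : z = (z.1, z.2) := rfl
              rwa [hzz, hz2'] at hz
      · simp only [bStep, hrow]
        rw [List.nodup_append]
        refine ⟨?_, hc, ?_⟩
        · rw [List.nodup_reverse]
          exact hRnd.map (fun a b hab => by simpa using congrArg Prod.fst hab)
        · intro a ham b hbm
          rw [hmapmem] at ham
          obtain ⟨ha2, ha1⟩ := ham
          intro hab
          subst hab
          have hzz : a = (a.1, a.2) := rfl
          rw [hzz, ha2] at hbm
          exact hRnotE a.1 ha1 hbm
      · intro z
        simp only [bStep, hrow]
        exact hsync' z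
      · simp only [bStep, hrow, List.length_append, List.length_reverse, List.length_map]
        push_cast
        omega

-- ===== VERDICT (by name: the statement is the Claim_ definition above) =====
theorem part2_spec : Claim_equal_part2 := by
  unfold Claim_equal_part2
  intro entities _ hpre
  unfold Spec_part2
  obtain ⟨hne, p0, hp0mem, hp0y⟩ := hpre
  have hp0E : p0 ∈ PySem.Set.ofList entities := (PySem.Set.mem_ofList entities p0).mpr hp0mem
  have hp0map : p0.2 ∈ (PySem.Set.ofList entities).map Prod.snd := List.mem_map_of_mem hp0E
  obtain ⟨m, hmax⟩ : ∃ m, PySem.List.max? ((PySem.Set.ofList entities).map Prod.snd)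
      (fun v => v) = some m := by
    cases hmx : PySem.List.max? ((PySem.Set.ofList entities).map Prod.snd) (fun v => v) with
    | none =>
      exfalso
      have := (PySem.List.max?_eq_none_iff _ _).mp hmx
      rw [this] at hp0map
      exact absurd hp0map (List.not_mem_nil)
    | some m => exact ⟨m, rfl⟩
  have hm2 : -2 ≤ m := le_trans hp0y (PySem.List.max?_isMax hmax _ hp0map)
  have hfloor : 0 ≤ m + 2 := by omega
  simp only [part2, part2_alt, hmax, Option.getD_some]
  set E0 := PySem.Set.ofList entities with hE0def
  set hs0 := Std.HashSet.ofList entities with hhs0def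
  set floorv := m + 2 with hfloordef
  have hnodup0 : E0.Nodup := PySem.Set.nodup_ofList entities
  have hsync0 : ∀ z : Int × Int, z ∈ hs0 ↔ z ∈ E0 := by
    intro z
    rw [hhs0def, Std.HashSet.mem_ofList, List.contains_iff_mem, hE0def,
      PySem.Set.mem_ofList]
  have hAmem : ∀ x, x ∈ part2Loop floorv (3 * ((2 * floorv.toNat + 1) * floorv.toNat) + 2)
      E0 hs0 [(500, 0)] ↔ x ∈ E0 ∨ RF floorv E0 (500, 0) x := by
    have hcard : (rect floorv).card = (2 * floorv.toNat + 1) * floorv.toNat := by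
      rw [rect, Finset.card_product, Int.card_Icc, Int.card_Icc]
      have h1 : 500 + floorv + 1 - (500 - floorv) = 2 * floorv + 1 := by ring
      have h2 : floorv - 1 + 1 - 0 = floorv := by ring
      rw [h1, h2]
      have h3 : (2 * floorv + 1).toNat = 2 * floorv.toNat + 1 := by omega
      rw [h3]
    have hfree : freeCount floorv E0 ≤ (rect floorv).card := Finset.card_filter_le _ _
    have h := loop_mem floorv (3 * ((2 * floorv.toNat + 1) * floorv.toNat) + 2) E0 hs0
      [(500, 0)] hsync0
      (by
        intro p hp
        rw [List.mem_singleton] at hp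
        subst hp
        refine ⟨by omega, by omega, by omega, by omega⟩)
      (by simp only [List.length_singleton]; omega)
    intro x
    rw [h x]
    simp
  have hAnodup : (part2Loop floorv (3 * ((2 * floorv.toNat + 1) * floorv.toNat) + 2)
      E0 hs0 [(500, 0)]).Nodup := loop_nodup floorv _ E0 hs0 _ hsync0 hnodup0
  by_cases hcase : 1 ≤ floorv
  · -- floor ≥ 1: the outer sweep of B runs floor - 1 rows after the initial one
    have hBfold : (fun (st : List Int × List (Int × Int) × Std.HashSet (Int × Int) × Int)
        (y : Int) =>
        ((part2AltRow y st.1 st.2.1 st.2.2.1).1, (part2AltRow y st.1 st.2.1 st.2.2.1).2.1,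
          (part2AltRow y st.1 st.2.1 st.2.2.1).2.2,
          st.2.2.2 + ((part2AltRow y st.1 st.2.1 st.2.2.1).1.length : Int))) = bStep := by
      funext st y
      simp only [bStep]
    rw [hBfold]
    have hk1 : 1 ≤ floorv.toNat := by omega
    have hkf : ((floorv.toNat : Nat) : Int) ≤ floorv := by omega
    obtain ⟨-, hfb, hfc, -, hfe⟩ := outer_inv floorv E0 hs0 hnodup0 hsync0 hcase
      floorv.toNat hk1 hkf
    have hcast : ((floorv.toNat : Nat) : Int) = floorv := Int.toNat_of_nonneg (by omega)
    rw [hcast] at hfb hfc hfe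
    set st := (PySem.List.pyRange 1 floorv).foldl bStep
      (if (decide (floorv > 0) && !(hs0.contains (500, 0))) = true then
        ([500], (500, 0) :: E0, hs0.insert (500, 0), 1) else ([], E0, hs0, 0)) with hstdef
    rw [hfe]
    have hmemEq : ∀ x, x ∈ part2Loop floorv (3 * ((2 * floorv.toNat + 1) * floorv.toNat) + 2)
        E0 hs0 [(500, 0)] ↔ x ∈ st.2.1 := by
      intro x
      rw [hAmem x, hfb x]
      constructor
      · rintro (hx | hx)
        · exact Or.inl hx
        · exact Or.inr ⟨hx, by have := RF_bounds (by omega) hx; omega⟩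
      · rintro (hx | ⟨hx, -⟩)
        · exact Or.inl hx
        · exact Or.inr hx
    have hperm := (List.perm_ext_iff_of_nodup hAnodup hfc).mpr hmemEq
    have hlen := hperm.length_eq
    simp only [PySem.Set.len]
    omega
  · -- floor = 0: the source cell is already on the floor, no sand falls at all
    have hf0 : floorv = 0 := by omega
    have hpy0 : PySem.List.pyRange 1 floorv = [] := by rw [hf0]; decide
    have hcond0 : decide (floorv > 0) = false := by simp; omega
    rw [hpy0, hcond0]
    simp only [Bool.false_and, Bool.false_eq_true, if_false, List.foldl_nil]
    have hmemEq : ∀ x, x ∈ part2Loop floorv (3 * ((2 * floorv.toNat + 1) * floorv.toNat) + 2)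
        E0 hs0 [(500, 0)] ↔ x ∈ E0 := by
      intro x
      rw [hAmem x]
      constructor
      · rintro (hx | hx)
        · exact hx
        · have := RF_bounds (by omega) hx
          omega
      · exact Or.inl
    have hperm := (List.perm_ext_iff_of_nodup hAnodup hnodup0).mpr hmemEq
    have hlen := hperm.length_eq
    simp only [PySem.Set.len]
    omega
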